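-- pv_equiv track=rewrite | github.com/arcticcougar/padel-scheduler | venv/Scripts/padel.py | generate_Schedule_Statistics
-- ===== SOURCE A (Python) =====
-- def generate_Schedule_Statistics(teammate_matrix, opponent_matrix, rest_tracker, player_names):
--     output = []
--     teammate_total, opponent_total = 0, 0
--     teammate_frequencies, opponent_frequencies = {}, {}
--     num_players = len(player_names)
--
--     for player in range(num_players):
--         rest_count = rest_tracker[player]
--         teammates_opponents = []
--         for other_player in range(num_players):
--             if player != other_player:
--                 teammate_count = teammate_matrix[player][other_player]
--                 opponent_count = opponent_matrix[player][other_player]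
--
--                 teammate_frequencies[teammate_count] = teammate_frequencies.get(teammate_count, 0) + 1
--                 opponent_frequencies[opponent_count] = opponent_frequencies.get(opponent_count, 0) + 1
--
--                 teammates_opponents.append(f"{player_names[other_player]} [{teammate_count},{opponent_count}]")
--                 teammate_total += teammate_count
--                 opponent_total += opponent_count
--
--         output.append(f"{player_names[player]} [{rest_count}]: " + ", ".join(teammates_opponents))
--
--     output.append(f"\nTeammate Total: {teammate_total}")
--     output.append(f"Opponent Total: {opponent_total}")
--
--     output.append("\nTeammate Count Frequencies:")
--     output.extend([f"  Count {count}: {freq}" for count, freq in sorted(teammate_frequencies.items())])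
--
--     output.append("\nOpponent Count Frequencies:")
--     output.extend([f"  Count {count}: {freq}" for count, freq in sorted(opponent_frequencies.items())])
--
--     return "\n".join(output)
-- ===== SOURCE B (Python) =====
-- def generate_Schedule_Statistics(teammate_matrix, opponent_matrix, rest_tracker, player_names):
--     n = len(player_names)
--     off = [(p, o) for p in range(n) for o in range(n) if p != o]
--     t_entries = [teammate_matrix[p][o] for p, o in off]
--     o_entries = [opponent_matrix[p][o] for p, o in off]
--
--     def freq_lines(entries):
--         freq = {}
--         for x in entries:
--             freq[x] = freq.get(x, 0) + 1
--         return [f"  Count {count}: {f}" for count, f in sorted(freq.items())]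
--
--     lines = [
--         f"{player_names[p]} [{rest_tracker[p]}]: " + ", ".join(
--             f"{player_names[o]} [{teammate_matrix[p][o]},{opponent_matrix[p][o]}]"
--             for o in range(n) if p != o)
--         for p in range(n)
--     ]
--     return "\n".join(
--         lines
--         + [f"\nTeammate Total: {sum(t_entries)}", f"Opponent Total: {sum(o_entries)}"]
--         + ["\nTeammate Count Frequencies:"] + freq_lines(t_entries)
--         + ["\nOpponent Count Frequencies:"] + freq_lines(o_entries)
--     )
-- ===== Notes on version B (the rewrite author's own statement) =====
-- stated objective: simpler
-- what changed: B replaces A's single interleaved loop that threads five accumulators (output lines, two totals, two frequency dicts) with separate passes: a flat off-diagonal index list, list comprehensions for the entries and per-player lines, sum() for the totals, and a small frequency-table helper applied to each entry list.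
import Mathlib
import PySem

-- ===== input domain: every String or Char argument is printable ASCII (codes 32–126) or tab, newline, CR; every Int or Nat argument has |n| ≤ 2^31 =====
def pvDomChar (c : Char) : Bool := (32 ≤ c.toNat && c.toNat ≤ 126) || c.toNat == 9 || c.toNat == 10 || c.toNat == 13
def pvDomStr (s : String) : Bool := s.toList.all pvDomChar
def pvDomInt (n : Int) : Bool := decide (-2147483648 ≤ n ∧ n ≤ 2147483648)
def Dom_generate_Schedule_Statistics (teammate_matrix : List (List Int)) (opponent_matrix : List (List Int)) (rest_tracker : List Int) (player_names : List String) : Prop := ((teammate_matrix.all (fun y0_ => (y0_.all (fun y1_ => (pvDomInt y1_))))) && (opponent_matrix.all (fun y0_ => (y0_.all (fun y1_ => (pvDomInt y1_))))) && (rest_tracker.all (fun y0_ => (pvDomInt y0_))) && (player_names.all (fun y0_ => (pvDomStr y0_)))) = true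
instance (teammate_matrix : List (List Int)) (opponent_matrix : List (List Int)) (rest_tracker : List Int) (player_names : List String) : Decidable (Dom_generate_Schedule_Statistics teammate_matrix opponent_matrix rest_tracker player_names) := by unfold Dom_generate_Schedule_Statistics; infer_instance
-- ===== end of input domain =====

-- B builds the report from separate passes (flat off-diagonal entry lists, sums, a frequency helper,
-- a per-player line map) instead of A's single loop threading five accumulators; return value only.

-- ===== PORT A =====
-- loop state of A: (output, teammate_total, opponent_total, teammate_frequencies, opponent_frequencies)
-- (teammates_opponents, teammate_total, opponent_total, teammate_frequencies, opponent_frequencies) inside the inner loop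
def pvASt : Type := List String × Int × Int × PySem.Dict Int Int × PySem.Dict Int Int

-- body of A's inner 'for other_player in range(num_players)' loop
def pvAInner (teammate_matrix opponent_matrix : List (List Int)) (player_names : List String) (p : Int) (s : pvASt) (o : Int) : pvASt :=
  if p ≠ o then
    let tc := PySem.List.pyGetD (PySem.List.pyGetD teammate_matrix p []) o 0
    let oc := PySem.List.pyGetD (PySem.List.pyGetD opponent_matrix p []) o 0
    (s.1 ++ [PySem.List.pyGetD player_names o "" ++ " [" ++ PySem.Int.toStr tc ++ "," ++ PySem.Int.toStr oc ++ "]"],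
     s.2.1 + tc, s.2.2.1 + oc,
     s.2.2.2.1.insert tc (s.2.2.2.1.getD tc 0 + 1),
     s.2.2.2.2.insert oc (s.2.2.2.2.getD oc 0 + 1))
  else s

-- body of A's outer 'for player in range(num_players)' loop
def pvAOuter (teammate_matrix opponent_matrix : List (List Int)) (rest_tracker : List Int) (player_names : List String) (n : Int) (st : pvASt) (p : Int) : pvASt :=
  let rest_count := PySem.List.pyGetD rest_tracker p 0
  let inner := (PySem.List.pyRange 0 n 1).foldl (pvAInner teammate_matrix opponent_matrix player_names p)
    ((([] : List String), st.2.1, st.2.2.1, st.2.2.2.1, st.2.2.2.2) : pvASt)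
  (st.1 ++ [PySem.List.pyGetD player_names p "" ++ " [" ++ PySem.Int.toStr rest_count ++ "]: " ++ PySem.Str.join ", " inner.1],
   inner.2.1, inner.2.2.1, inner.2.2.2.1, inner.2.2.2.2)

def generate_Schedule_Statistics (teammate_matrix : List (List Int)) (opponent_matrix : List (List Int)) (rest_tracker : List Int) (player_names : List String) : String :=
  let n : Int := (player_names.length : Int)
  let st := (PySem.List.pyRange 0 n 1).foldl (pvAOuter teammate_matrix opponent_matrix rest_tracker player_names n)
    ((([], 0, 0, PySem.Dict.empty, PySem.Dict.empty)) : pvASt)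
  PySem.Str.join "\n"
    (st.1
      ++ ["\nTeammate Total: " ++ PySem.Int.toStr st.2.1]
      ++ ["Opponent Total: " ++ PySem.Int.toStr st.2.2.1]
      ++ ["\nTeammate Count Frequencies:"]
      ++ (PySem.List.sorted2 st.2.2.2.1.items (fun cf => cf.1) (fun cf => cf.2)).map
           (fun cf => "  Count " ++ PySem.Int.toStr cf.1 ++ ": " ++ PySem.Int.toStr cf.2)
      ++ ["\nOpponent Count Frequencies:"]
      ++ (PySem.List.sorted2 st.2.2.2.2.items (fun cf => cf.1) (fun cf => cf.2)).map
           (fun cf => "  Count " ++ PySem.Int.toStr cf.1 ++ ": " ++ PySem.Int.toStr cf.2))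

-- ===== PORT B =====
-- B's freq_lines helper: the dict loop 'freq[x] = freq.get(x, 0) + 1' then the sorted items comprehension
def pvFreqLines (entries : List Int) : List String :=
  let freq := entries.foldl (fun (d : PySem.Dict Int Int) x => d.insert x (d.getD x 0 + 1)) PySem.Dict.empty
  (PySem.List.sorted2 freq.items (fun cf => cf.1) (fun cf => cf.2)).map
    (fun cf => "  Count " ++ PySem.Int.toStr cf.1 ++ ": " ++ PySem.Int.toStr cf.2)

def generate_Schedule_Statistics_alt (teammate_matrix : List (List Int)) (opponent_matrix : List (List Int)) (rest_tracker : List Int) (player_names : List String) : String :=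
  let n : Int := (player_names.length : Int)
  let off := (PySem.List.pyRange 0 n 1).flatMap (fun p =>
      ((PySem.List.pyRange 0 n 1).filter (fun o => decide (p ≠ o))).map (fun o => (p, o)))
  let tE := off.map (fun pr => PySem.List.pyGetD (PySem.List.pyGetD teammate_matrix pr.1 []) pr.2 0)
  let oE := off.map (fun pr => PySem.List.pyGetD (PySem.List.pyGetD opponent_matrix pr.1 []) pr.2 0)
  let lines := (PySem.List.pyRange 0 n 1).map (fun p =>
      PySem.List.pyGetD player_names p "" ++ " [" ++ PySem.Int.toStr (PySem.List.pyGetD rest_tracker p 0) ++ "]: "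
        ++ PySem.Str.join ", " (((PySem.List.pyRange 0 n 1).filter (fun o => decide (p ≠ o))).map (fun o =>
             PySem.List.pyGetD player_names o "" ++ " [" ++ PySem.Int.toStr (PySem.List.pyGetD (PySem.List.pyGetD teammate_matrix p []) o 0) ++ "," ++ PySem.Int.toStr (PySem.List.pyGetD (PySem.List.pyGetD opponent_matrix p []) o 0) ++ "]")))
  PySem.Str.join "\n"
    (lines
      ++ ["\nTeammate Total: " ++ PySem.Int.toStr tE.sum, "Opponent Total: " ++ PySem.Int.toStr oE.sum]
      ++ ["\nTeammate Count Frequencies:"] ++ pvFreqLines tE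
      ++ ["\nOpponent Count Frequencies:"] ++ pvFreqLines oE)

-- ===== PRECONDITION & SPEC =====
-- Pre_ is exactly where Python A returns: every index A actually reads is in range (A raises IndexError otherwise).
def Pre_generate_Schedule_Statistics (teammate_matrix : List (List Int)) (opponent_matrix : List (List Int)) (rest_tracker : List Int) (player_names : List String) : Prop :=
  player_names.length ≤ rest_tracker.length ∧
  ∀ p < player_names.length, ∀ o < player_names.length, o ≠ p →
    p < teammate_matrix.length ∧ p < opponent_matrix.length ∧
    o < (teammate_matrix.getD p []).length ∧ o < (opponent_matrix.getD p []).length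
instance (teammate_matrix : List (List Int)) (opponent_matrix : List (List Int)) (rest_tracker : List Int) (player_names : List String) : Decidable (Pre_generate_Schedule_Statistics teammate_matrix opponent_matrix rest_tracker player_names) := by unfold Pre_generate_Schedule_Statistics; infer_instance
def pvWitness_generate_Schedule_Statistics : List (List Int) × List (List Int) × List Int × List String :=
  ([[0, 1], [1, 0]], [[0, 2], [2, 0]], [1, 1], ["A", "B"])

def Spec_generate_Schedule_Statistics (teammate_matrix : List (List Int)) (opponent_matrix : List (List Int)) (rest_tracker : List Int) (player_names : List String) (out : String) : Prop := out = generate_Schedule_Statistics_alt teammate_matrix opponent_matrix rest_tracker player_names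
instance (teammate_matrix : List (List Int)) (opponent_matrix : List (List Int)) (rest_tracker : List Int) (player_names : List String) (out : String) : Decidable (Spec_generate_Schedule_Statistics teammate_matrix opponent_matrix rest_tracker player_names out) := by unfold Spec_generate_Schedule_Statistics; infer_instance

-- ===== CLAIM (what is proved, stated in full; the proofs are below) =====
def Claim_equal_generate_Schedule_Statistics : Prop := ∀ (teammate_matrix : List (List Int)) (opponent_matrix : List (List Int)) (rest_tracker : List Int) (player_names : List String), Dom_generate_Schedule_Statistics teammate_matrix opponent_matrix rest_tracker player_names → Pre_generate_Schedule_Statistics teammate_matrix opponent_matrix rest_tracker player_names → Spec_generate_Schedule_Statistics teammate_matrix opponent_matrix rest_tracker player_names (generate_Schedule_Statistics teammate_matrix opponent_matrix rest_tracker player_names)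

-- ===== LEMMAS AND PROOFS =====

-- one off-diagonal matrix entry, the per-(p,o) display cell, a row of off-diagonal entries, the counting step
def pvGet (m : List (List Int)) (p o : Int) : Int := PySem.List.pyGetD (PySem.List.pyGetD m p []) o 0
def pvRow (m : List (List Int)) (il : List Int) (p : Int) : List Int :=
  (il.filter (fun o => decide (p ≠ o))).map (pvGet m p)
def pvCell (teammate_matrix opponent_matrix : List (List Int)) (player_names : List String) (p o : Int) : String :=
  PySem.List.pyGetD player_names o "" ++ " [" ++ PySem.Int.toStr (pvGet teammate_matrix p o) ++ "," ++ PySem.Int.toStr (pvGet opponent_matrix p o) ++ "]"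
def pvIns (d : PySem.Dict Int Int) (x : Int) : PySem.Dict Int Int := d.insert x (d.getD x 0 + 1)
def pvLine (teammate_matrix opponent_matrix : List (List Int)) (rest_tracker : List Int) (player_names : List String) (il : List Int) (p : Int) : String :=
  PySem.List.pyGetD player_names p "" ++ " [" ++ PySem.Int.toStr (PySem.List.pyGetD rest_tracker p 0) ++ "]: "
    ++ PySem.Str.join ", " ((il.filter (fun o => decide (p ≠ o))).map (pvCell teammate_matrix opponent_matrix player_names p))

theorem pv_inner_eq (tm om : List (List Int)) (pn : List String) (p : Int) (il : List Int) (s : pvASt) :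
    il.foldl (pvAInner tm om pn p) s
      = (s.1 ++ (il.filter (fun o => decide (p ≠ o))).map (pvCell tm om pn p),
         s.2.1 + (pvRow tm il p).sum,
         s.2.2.1 + (pvRow om il p).sum,
         (pvRow tm il p).foldl pvIns s.2.2.2.1,
         (pvRow om il p).foldl pvIns s.2.2.2.2) := by
  induction il generalizing s with
  | nil => simp [pvRow]
  | cons o rest ih =>
    by_cases h : p ≠ o
    · simp [List.foldl_cons, pvAInner, h, ih, pvRow, pvCell, pvGet, pvIns, add_assoc]
    · simp [List.foldl_cons, pvAInner, h, ih, pvRow]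

theorem pv_outer_eq (tm om : List (List Int)) (rt : List Int) (pn : List String) (n : Int) (l : List Int) (s : pvASt) :
    l.foldl (pvAOuter tm om rt pn n) s
      = (s.1 ++ l.map (pvLine tm om rt pn (PySem.List.pyRange 0 n 1)),
         s.2.1 + (l.map (fun p => (pvRow tm (PySem.List.pyRange 0 n 1) p).sum)).sum,
         s.2.2.1 + (l.map (fun p => (pvRow om (PySem.List.pyRange 0 n 1) p).sum)).sum,
         (l.flatMap (pvRow tm (PySem.List.pyRange 0 n 1))).foldl pvIns s.2.2.2.1,
         (l.flatMap (pvRow om (PySem.List.pyRange 0 n 1))).foldl pvIns s.2.2.2.2) := by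
  induction l generalizing s with
  | nil => simp
  | cons p rest ih =>
    simp [List.foldl_cons, pvAOuter, pv_inner_eq, ih, pvLine, List.foldl_append, add_assoc]

-- B's flat entry list is the concatenation of the per-player rows
theorem pv_map_off (m : List (List Int)) (il l : List Int) :
    ((l.flatMap (fun p => (il.filter (fun o => decide (p ≠ o))).map (fun o => (p, o)))).map
        (fun pr => PySem.List.pyGetD (PySem.List.pyGetD m pr.1 []) pr.2 0))
      = l.flatMap (pvRow m il) := by
  simp only [List.map_flatMap]
  congr 1
  funext a
  simp [List.map_map, Function.comp_def, pvRow, pvGet]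

theorem pv_sum_flat (m : List (List Int)) (il l : List Int) :
    (l.flatMap (pvRow m il)).sum = (l.map (fun p => (pvRow m il p).sum)).sum := by
  induction l with
  | nil => rfl
  | cons p rest ih => simp [List.flatMap_cons, ih]

theorem pv_lines_eq (tm om : List (List Int)) (rt : List Int) (pn : List String) (il l : List Int) :
    l.map (pvLine tm om rt pn il)
      = l.map (fun p =>
          PySem.List.pyGetD pn p "" ++ " [" ++ PySem.Int.toStr (PySem.List.pyGetD rt p 0) ++ "]: "
            ++ PySem.Str.join ", " ((il.filter (fun o => decide (p ≠ o))).map (fun o =>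
                 PySem.List.pyGetD pn o "" ++ " [" ++ PySem.Int.toStr (PySem.List.pyGetD (PySem.List.pyGetD tm p []) o 0) ++ "," ++ PySem.Int.toStr (PySem.List.pyGetD (PySem.List.pyGetD om p []) o 0) ++ "]"))) := by
  apply List.map_congr_left
  intro p _
  simp only [pvLine]
  congr 1

theorem pv_foldl_ins_eq (d : PySem.Dict Int Int) (l : List Int) :
    l.foldl pvIns d = l.foldl (fun (d : PySem.Dict Int Int) x => d.insert x (d.getD x 0 + 1)) d := rfl

-- ===== VERDICT (by name: the statement is the Claim_ definition above) =====
theorem generate_Schedule_Statistics_spec : Claim_equal_generate_Schedule_Statistics := by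
  intro tm om rt pn _ _
  show _ = _
  simp only [generate_Schedule_Statistics, generate_Schedule_Statistics_alt,
    pv_outer_eq, pv_map_off, pvFreqLines]
  simp [pv_sum_flat, pv_lines_eq, pv_foldl_ins_eq]
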